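-- pv_equiv track=rewrite | github.com/3582730951/vmprotect | core/tools/artifact_audit.py | find_denylist_hits
-- ===== SOURCE A (Python) =====
-- def find_denylist_hits(values: list[str], denylist: list[str], field_name: str) -> list[dict[str, str]]:
--     hits: list[dict[str, str]] = []
--     denylist_lower = [(entry, entry.lower()) for entry in denylist]
--     for value in values:
--         lowered = value.lower()
--         for original, lowered_entry in denylist_lower:
--             if lowered_entry in lowered:
--                 hits.append({"field": field_name, "pattern": original, "value": value})
--     return hits
-- ===== SOURCE B (Python) =====
-- def find_denylist_hits(values: list[str], denylist: list[str], field_name: str) -> list[dict[str, str]]: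
--     # Transposed strategy: lowercase every value once, sweep the denylist in the
--     # outer loop filling a per-value bucket of matched patterns, then flatten
--     # the buckets in value order.
--     lowered = [value.lower() for value in values]
--     buckets: list[list[str]] = [[] for _ in values]
--     for original in denylist:
--         pat = original.lower()
--         for bucket, lv in zip(buckets, lowered):
--             if pat in lv:
--                 bucket.append(original)
--     out: list[dict[str, str]] = []
--     for value, bucket in zip(values, buckets):
--         for original in bucket:
--             out.append({"field": field_name, "pattern": original, "value": value})
--     return out
-- ===== Notes on version B (the rewrite author's own statement) =====
-- stated objective: alternative
-- what changed: B transposes the loops: it lowercases each value once, sweeps the denylist in the outer loop accumulating a per-value bucket of matched patterns, and flattens the buckets in value order, instead of A's value-outer loop appending dicts directly.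
import Mathlib
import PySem

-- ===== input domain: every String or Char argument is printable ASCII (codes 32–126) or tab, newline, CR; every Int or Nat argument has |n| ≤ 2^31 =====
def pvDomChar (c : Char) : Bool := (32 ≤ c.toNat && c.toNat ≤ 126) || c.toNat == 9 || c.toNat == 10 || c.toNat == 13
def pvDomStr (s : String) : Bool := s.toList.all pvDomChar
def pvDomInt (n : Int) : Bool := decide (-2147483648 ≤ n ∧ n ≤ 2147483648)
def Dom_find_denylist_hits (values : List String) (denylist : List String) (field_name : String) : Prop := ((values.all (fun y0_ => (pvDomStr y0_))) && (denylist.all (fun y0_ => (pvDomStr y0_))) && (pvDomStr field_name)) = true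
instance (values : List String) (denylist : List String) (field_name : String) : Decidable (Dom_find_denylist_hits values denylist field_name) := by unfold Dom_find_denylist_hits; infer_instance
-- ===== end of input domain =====

-- B transposes A's loops (denylist-outer, per-value buckets, then flatten); same results, no speed claim.


-- ===== PORT A =====
def find_denylist_hits (values : List String) (denylist : List String) (field_name : String) : List (List (String × String)) :=
  let denylist_lower := denylist.map (fun entry => (entry, PySem.Str.lower entry))
  values.foldl (fun hits value =>
    let lowered := PySem.Str.lower value
    denylist_lower.foldl (fun hits p =>
      if PySem.Str.isIn p.2 lowered then
        hits ++ [[("field", field_name), ("pattern", p.1), ("value", value)]]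
      else hits) hits) []

-- ===== PORT B =====
def find_denylist_hits_alt (values : List String) (denylist : List String) (field_name : String) : List (List (String × String)) :=
  let lowered := values.map (fun value => PySem.Str.lower value)
  let init : List (List String) := values.map (fun _ => [])
  let buckets := denylist.foldl (fun bs original =>
    let pat := PySem.Str.lower original
    (bs.zip lowered).map (fun p => if PySem.Str.isIn pat p.2 then p.1 ++ [original] else p.1)) init
  (values.zip buckets).foldl (fun out p =>
    out ++ p.2.map (fun original => [("field", field_name), ("pattern", original), ("value", p.1)])) []

-- ===== PRECONDITION & SPEC =====
def Spec_find_denylist_hits (values : List String) (denylist : List String) (field_name : String) (out : List (List (String × String))) : Prop := out = find_denylist_hits_alt values denylist field_name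
instance (values : List String) (denylist : List String) (field_name : String) (out : List (List (String × String))) : Decidable (Spec_find_denylist_hits values denylist field_name out) := by unfold Spec_find_denylist_hits; infer_instance

-- ===== CLAIM (what is proved, stated in full; the proofs are below) =====
def Claim_equal_find_denylist_hits : Prop := ∀ (values : List String) (denylist : List String) (field_name : String), Dom_find_denylist_hits values denylist field_name → Spec_find_denylist_hits values denylist field_name (find_denylist_hits values denylist field_name)

-- ===== LEMMAS AND PROOFS =====

/-- The common normal form both ports are reduced to. -/
def dlSpec (values : List String) (denylist : List String) (field_name : String) : List (List (String × String)) :=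
  values.flatMap (fun value =>
    (denylist.filter (fun o => PySem.Str.isIn (PySem.Str.lower o) (PySem.Str.lower value))).map
      (fun o => [("field", field_name), ("pattern", o), ("value", value)]))

theorem find_A_eq_spec (values denylist : List String) (field_name : String) :
    find_denylist_hits values denylist field_name = dlSpec values denylist field_name := by
  unfold find_denylist_hits dlSpec
  have h : ∀ value (acc : List (List (String × String))),
      (denylist.map (fun entry => (entry, PySem.Str.lower entry))).foldl
        (fun hits p => if PySem.Str.isIn p.2 (PySem.Str.lower value) then
            hits ++ [[("field", field_name), ("pattern", p.1), ("value", value)]] else hits) acc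
      = acc ++ (denylist.filter (fun o => PySem.Str.isIn (PySem.Str.lower o) (PySem.Str.lower value))).map
          (fun o => [("field", field_name), ("pattern", o), ("value", value)]) := by
    intro value acc
    rw [List.foldl_map,
      PySem.List.foldl_append_if (p := fun e => PySem.Str.isIn (PySem.Str.lower e) (PySem.Str.lower value))
        (f := fun e => [("field", field_name), ("pattern", e), ("value", value)])]
  simp only [h]
  rw [PySem.List.foldl_append_eq_flatMap]
  simp

theorem buckets_eq (values denylist : List String) (g : String → List String) :
    denylist.foldl (fun bs original =>
      ((bs.zip (values.map (fun v => PySem.Str.lower v))).map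
        (fun p => if PySem.Str.isIn (PySem.Str.lower original) p.2 then p.1 ++ [original] else p.1)))
      (values.map g)
    = values.map (fun v => g v ++ denylist.filter (fun o => PySem.Str.isIn (PySem.Str.lower o) (PySem.Str.lower v))) := by
  induction denylist generalizing g with
  | nil => simp
  | cons d ds ih =>
    simp only [List.foldl_cons]
    rw [List.zip_map', List.map_map]
    simp only [Function.comp_def]
    rw [ih (fun x => if PySem.Str.isIn (PySem.Str.lower d) (PySem.Str.lower x) then g x ++ [d] else g x)]
    apply List.map_congr_left
    intro v _
    by_cases hc : PySem.Chars.isIn (PySem.Chars.lower d.toList) (PySem.Chars.lower v.toList) = true <;>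
      simp [hc]

theorem zip_map_self {α β : Type} (l : List α) (f : α → β) :
    l.zip (l.map f) = l.map (fun x => (x, f x)) := by
  induction l with
  | nil => rfl
  | cons a t ih => simp [ih]

theorem find_B_eq_spec (values denylist : List String) (field_name : String) :
    find_denylist_hits_alt values denylist field_name = dlSpec values denylist field_name := by
  unfold find_denylist_hits_alt dlSpec
  simp only []
  rw [buckets_eq values denylist (fun _ => [])]
  simp only [List.nil_append]
  rw [zip_map_self, ← List.foldl_map,
    PySem.List.foldl_append_eq_flatMap]
  simp [List.flatMap_map]

-- ===== VERDICT (by name: the statement is the Claim_ definition above) =====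
theorem find_denylist_hits_spec : Claim_equal_find_denylist_hits := by
  intro values denylist field_name _
  unfold Spec_find_denylist_hits
  rw [find_A_eq_spec, find_B_eq_spec]
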